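-- pv_equiv track=rewrite | github.com/edansbash/aws-compliance-dashboard | api/app/services/notifications/jira.py | _find_close_transition
-- ===== SOURCE A (Python) =====
-- from typing import Dict, List, Optional
--
-- def _find_close_transition(transitions: List[dict]) -> Optional[dict]:
--     """
--     Find the best transition to close a ticket, preferring CLOSED over RELEASED.
--
--     Args:
--         transitions: List of available transitions from JIRA
--
--     Returns:
--         The best matching transition dict, or None if not found
--     """
--     # Ordered list of preferred transition names (first match wins)
--     # CLOSED is preferred over RELEASED
--     preferred_names = [
--         "CLOSED", "Closed", "Close",
--         "Done", "Resolve Issue", "Resolved", "Close Issue", "Complete",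
--         "RELEASED", "Released", "Release",
--         "REJECTED", "Rejected", "Reject",
--     ]
--
--     # Build a map of transition names to transitions
--     transition_map = {t.get("name"): t for t in transitions}
--
--     # Find first matching preferred transition
--     for name in preferred_names:
--         if name in transition_map:
--             return transition_map[name]
--
--     return None
-- ===== SOURCE B (Python) =====
-- from typing import Dict, List, Optional
--
-- def _find_close_transition(transitions: List[dict]) -> Optional[dict]:
--     """Single pass over transitions keeping the running minimum-priority match."""
--     preferred_names = [
--         "CLOSED", "Closed", "Close",
--         "Done", "Resolve Issue", "Resolved", "Close Issue", "Complete",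
--         "RELEASED", "Released", "Release",
--         "REJECTED", "Rejected", "Reject",
--     ]
--     priority = {name: rank for rank, name in enumerate(preferred_names)}
--     best = None
--     best_rank = len(preferred_names)
--     for t in transitions:
--         rank = priority.get(t.get("name"))
--         if rank is not None and rank <= best_rank:
--             best, best_rank = t, rank
--     return best
-- ===== Notes on version B (the rewrite author's own statement) =====
-- stated objective: alternative
-- what changed: Instead of building a name->transition dict and scanning the 14 preferred names in order, B builds a name->rank dict once and makes a single pass over transitions keeping a running minimum rank (<= so a later same-rank transition overwrites, matching dict last-wins).
import Mathlib
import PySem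

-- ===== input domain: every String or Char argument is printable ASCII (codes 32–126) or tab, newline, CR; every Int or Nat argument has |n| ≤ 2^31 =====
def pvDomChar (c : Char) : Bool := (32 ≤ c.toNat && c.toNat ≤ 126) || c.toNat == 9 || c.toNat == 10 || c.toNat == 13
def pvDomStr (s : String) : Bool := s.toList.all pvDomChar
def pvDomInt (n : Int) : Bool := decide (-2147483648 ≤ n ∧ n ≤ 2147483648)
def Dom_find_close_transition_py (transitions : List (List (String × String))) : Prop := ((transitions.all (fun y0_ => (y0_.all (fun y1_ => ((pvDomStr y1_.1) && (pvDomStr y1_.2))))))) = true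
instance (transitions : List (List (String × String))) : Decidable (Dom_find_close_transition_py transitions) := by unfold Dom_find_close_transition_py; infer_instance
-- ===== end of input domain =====

-- B replaces A's name->transition dict plus ordered 14-name scan by a name->rank dict and a
-- single running-minimum pass over the transitions (alternative decomposition, same cost).


-- the preferred_names literal both Pythons contain
def pvPreferredNames : List String :=
  ["CLOSED", "Closed", "Close",
   "Done", "Resolve Issue", "Resolved", "Close Issue", "Complete",
   "RELEASED", "Released", "Release",
   "REJECTED", "Rejected", "Reject"]

-- t.get(k) on an association-list dict: first match (exact for Python dict.get, keys unique)
def pvDictGet (t : List (String × String)) (k : String) : Option String :=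
  (t.find? (fun p => p.1 == k)).map (·.2)

-- ===== PORT A =====
-- the 'for name in preferred_names: if name in transition_map: return transition_map[name]' loop
def pvLoopA (m : PySem.Dict (Option String) (List (String × String))) :
    List String → Option (List (String × String))
  | [] => none
  | n :: rest => if m.contains (some n) then m.get? (some n) else pvLoopA m rest

def find_close_transition_py (transitions : List (List (String × String))) :
    Option (List (String × String)) :=
  let transition_map : PySem.Dict (Option String) (List (String × String)) :=
    transitions.foldl (fun d t => d.insert (pvDictGet t "name") t) PySem.Dict.empty
  pvLoopA transition_map pvPreferredNames

-- ===== PORT B =====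
def find_close_transition_py_alt (transitions : List (List (String × String))) :
    Option (List (String × String)) :=
  let priority : PySem.Dict String Int :=
    (PySem.List.enumerate pvPreferredNames 0).foldl (fun d p => d.insert p.2 p.1) PySem.Dict.empty
  let res :=
    transitions.foldl (fun s t =>
        match (pvDictGet t "name").bind (fun n => priority.get? n) with
        | some r => if r ≤ s.2 then (some t, r) else s
        | none => s)
      ((none : Option (List (String × String))), (pvPreferredNames.length : Int))
  res.1

-- ===== PRECONDITION & SPEC =====
def Spec_find_close_transition_py (transitions : List (List (String × String))) (out : Option (List (String × String))) : Prop := out = find_close_transition_py_alt transitions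
instance (transitions : List (List (String × String))) (out : Option (List (String × String))) : Decidable (Spec_find_close_transition_py transitions out) := by unfold Spec_find_close_transition_py; infer_instance

-- ===== CLAIM (what is proved, stated in full; the proofs are below) =====
def Claim_equal_find_close_transition_py : Prop := ∀ (transitions : List (List (String × String))), Dom_find_close_transition_py transitions → Spec_find_close_transition_py transitions (find_close_transition_py transitions)

-- ===== LEMMAS AND PROOFS =====

-- first index i of names with some names[i] = k
def pvFidx (k : Option String) : List String → Option Nat
  | [] => none
  | n :: rest => if some n = k then some 0 else (pvFidx k rest).map (· + 1)

-- first index of names whose key is contained in m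
def pvMidx (m : PySem.Dict (Option String) (List (String × String))) : List String → Option Nat
  | [] => none
  | n :: rest => if m.contains (some n) then some 0 else (pvMidx m rest).map (· + 1)

-- B's best_rank encoding of the first contained index (len(preferred_names) = no match yet)
def pvRankOf (o : Option Nat) : Int :=
  match o with
  | none => (pvPreferredNames.length : Int)
  | some i => (i : Int)

-- selector: the value A's scan yields after an insert of rank f into a dict of best rank j
def pvSel {α : Type} (f j : Option Nat) (a b : α) : α :=
  match f, j with
  | none, _ => b
  | some _, none => a
  | some r, some j => if r ≤ j then a else b

def pvMin (f j : Option Nat) : Option Nat :=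
  match f, j with
  | none, j => j
  | some r, none => some r
  | some r, some j => some (min r j)

theorem pvSel_zero {α : Type} (j : Option Nat) (a b : α) : pvSel (some 0) j a b = a := by
  rcases j with _ | j <;> simp [pvSel]

theorem pvSel_succ_zero {α : Type} (f : Option Nat) (a b : α) :
    pvSel (f.map (· + 1)) (some 0) a b = b := by
  rcases f with _ | r <;> simp [pvSel]

theorem pvSel_succ {α : Type} (f j : Option Nat) (a b : α) :
    pvSel (f.map (· + 1)) (j.map (· + 1)) a b = pvSel f j a b := by
  rcases f with _ | r <;> rcases j with _ | j <;> simp [pvSel]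

theorem pvMin_zero (j : Option Nat) : pvMin (some 0) j = some 0 := by
  rcases j with _ | j <;> simp [pvMin]

theorem pvMin_succ_zero (f : Option Nat) : pvMin (f.map (· + 1)) (some 0) = some 0 := by
  rcases f with _ | r <;> simp [pvMin]

theorem pvMin_succ (f j : Option Nat) :
    pvMin (f.map (· + 1)) (j.map (· + 1)) = (pvMin f j).map (· + 1) := by
  rcases f with _ | r <;> rcases j with _ | j <;> simp [pvMin, min_add_add_right]

theorem pvFidx_none (names : List String) : pvFidx none names = none := by
  induction names with
  | nil => rfl
  | cons n rest ih => simp [pvFidx, ih]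

theorem pvFidx_lt (k : Option String) (names : List String) (r : Nat)
    (h : pvFidx k names = some r) : r < names.length := by
  induction names generalizing r with
  | nil => simp [pvFidx] at h
  | cons n rest ih =>
    simp only [pvFidx] at h
    split at h
    · simp only [Option.some.injEq] at h
      subst h; simp
    · rcases Option.map_eq_some_iff.mp h with ⟨r', hr', rfl⟩
      have := ih r' hr'
      simp only [List.length_cons]
      omega

theorem pvFidx_eq_none_iff (n : String) (names : List String) :
    pvFidx (some n) names = none ↔ n ∉ names := by
  induction names with
  | nil => simp [pvFidx]
  | cons m rest ih =>
    by_cases h : m = n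
    · subst h; simp [pvFidx]
    · simp [pvFidx, h, Option.map_eq_none_iff, ih, Ne.symm h]

-- effect of one insert on A's scan
theorem pvLoopA_insert (names : List String)
    (m : PySem.Dict (Option String) (List (String × String))) (k : Option String)
    (t : List (String × String)) :
    pvLoopA (m.insert k t) names =
      pvSel (pvFidx k names) (pvMidx m names) (some t) (pvLoopA m names) := by
  induction names with
  | nil => rfl
  | cons n rest ih =>
    by_cases hk : some n = k
    · subst hk
      simp only [pvLoopA, pvFidx, pvMidx, PySem.Dict.contains_insert, BEq.rfl, Bool.true_or,
                 if_true, PySem.Dict.get?_insert_self, pvSel_zero]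
    · have hne : (some n) ≠ k := hk
      have hbeq : (some n == k) = false := by simp [hk]
      simp only [pvLoopA, pvFidx, pvMidx, PySem.Dict.contains_insert, hbeq, Bool.false_or,
                 if_neg hk, PySem.Dict.get?_insert_of_ne _ _ hne]
      by_cases hc : m.contains (some n)
      · simp only [hc, if_true, pvSel_succ_zero]
      · simp only [hc, Bool.false_eq_true, if_false, ih, pvSel_succ]

-- effect of one insert on the first contained index
theorem pvMidx_insert (names : List String)
    (m : PySem.Dict (Option String) (List (String × String))) (k : Option String)
    (t : List (String × String)) :
    pvMidx (m.insert k t) names = pvMin (pvFidx k names) (pvMidx m names) := by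
  induction names with
  | nil => rfl
  | cons n rest ih =>
    by_cases hk : some n = k
    · subst hk
      simp only [pvMidx, pvFidx, PySem.Dict.contains_insert, BEq.rfl, Bool.true_or, if_true,
                 pvMin_zero]
    · have hbeq : (some n == k) = false := by simp [hk]
      simp only [pvMidx, pvFidx, PySem.Dict.contains_insert, hbeq, Bool.false_or, if_neg hk]
      by_cases hc : m.contains (some n)
      · simp only [hc, if_true, pvMin_succ_zero]
      · simp only [hc, Bool.false_eq_true, if_false, ih, pvMin_succ]

-- the enumerate-fold priority dict looks up the first index in the names list
theorem pvEnumFold_get (names : List String) (n : String) (i0 : Int) (d : PySem.Dict String Int)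
    (hnd : names.Nodup) :
    ((PySem.List.enumerate names i0).foldl (fun d p => d.insert p.2 p.1) d).get? n =
      match pvFidx (some n) names with
      | some r => some (i0 + (r : Int))
      | none => d.get? n := by
  induction names generalizing i0 d with
  | nil => rfl
  | cons m rest ih =>
    rw [PySem.List.enumerate_cons]
    simp only [List.foldl_cons]
    rw [ih _ _ (List.Nodup.of_cons hnd)]
    by_cases h : m = n
    · subst h
      have hrest : pvFidx (some m) rest = none :=
        (pvFidx_eq_none_iff m rest).mpr (by simp_all)
      simp [pvFidx, hrest, PySem.Dict.get?_insert_self]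
    · have hne : n ≠ m := Ne.symm h
      simp only [pvFidx, Option.some.injEq, h, if_false,
                 PySem.Dict.get?_insert_of_ne _ _ hne]
      rcases hf : pvFidx (some n) rest with _ | r
      · simp
      · simp only [Option.map_some]
        have : i0 + ((r : Int) + 1) = i0 + 1 + (r : Int) := by omega
        push_cast
        rw [this]

theorem pvPriority_get (n : String) :
    ((PySem.List.enumerate pvPreferredNames 0).foldl (fun d p => d.insert p.2 p.1) PySem.Dict.empty).get? n
      = (pvFidx (some n) pvPreferredNames).map (fun i => (i : Int)) := by
  rw [pvEnumFold_get pvPreferredNames n 0 PySem.Dict.empty (by decide)]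
  rcases hf : pvFidx (some n) pvPreferredNames with _ | r
  · simp [PySem.Dict.get?_empty]
  · simp

-- one B-step equals the effect of one A-side insert on (scan result, best rank)
theorem pvStep (m : PySem.Dict (Option String) (List (String × String)))
    (t : List (String × String)) :
    (match (pvDictGet t "name").bind (fun n =>
        ((PySem.List.enumerate pvPreferredNames 0).foldl (fun d p => d.insert p.2 p.1) PySem.Dict.empty).get? n) with
     | some r => if r ≤ pvRankOf (pvMidx m pvPreferredNames) then (some t, r)
                 else (pvLoopA m pvPreferredNames, pvRankOf (pvMidx m pvPreferredNames))
     | none => (pvLoopA m pvPreferredNames, pvRankOf (pvMidx m pvPreferredNames)))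
      = (pvLoopA (m.insert (pvDictGet t "name") t) pvPreferredNames,
         pvRankOf (pvMidx (m.insert (pvDictGet t "name") t) pvPreferredNames)) := by
  set k := pvDictGet t "name" with hkdef
  have hbind : (k.bind (fun n =>
      ((PySem.List.enumerate pvPreferredNames 0).foldl (fun d p => d.insert p.2 p.1) PySem.Dict.empty).get? n))
      = (pvFidx k pvPreferredNames).map (fun i => (i : Int)) := by
    cases k with
    | none => simp [pvFidx_none]
    | some n => simp [pvPriority_get]
  rw [hbind, pvLoopA_insert, pvMidx_insert]
  rcases hf : pvFidx k pvPreferredNames with _ | r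
  · simp [pvSel, pvMin]
  · have hr : r < pvPreferredNames.length := pvFidx_lt _ _ _ hf
    rcases hm : pvMidx m pvPreferredNames with _ | j
    · simp [pvSel, pvMin, pvRankOf]
      omega
    · by_cases hrj : r ≤ j
      · have h1 : (r : Int) ≤ (j : Int) := by exact_mod_cast hrj
        simp [pvSel, pvMin, pvRankOf, hrj, h1]
      · have h1 : ¬ ((r : Int) ≤ (j : Int)) := by exact_mod_cast hrj
        simp [pvSel, pvMin, pvRankOf, hrj, h1]
        omega

-- B's fold keeps exactly (A's scan result, best rank) of the dict built so far
theorem pvMain (ts : List (List (String × String)))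
    (m : PySem.Dict (Option String) (List (String × String))) :
    ts.foldl (fun s t =>
        match (pvDictGet t "name").bind (fun n =>
            ((PySem.List.enumerate pvPreferredNames 0).foldl (fun d p => d.insert p.2 p.1) PySem.Dict.empty).get? n) with
        | some r => if r ≤ s.2 then (some t, r) else s
        | none => s)
      (pvLoopA m pvPreferredNames, pvRankOf (pvMidx m pvPreferredNames))
    = (pvLoopA (ts.foldl (fun d t => d.insert (pvDictGet t "name") t) m) pvPreferredNames,
       pvRankOf (pvMidx (ts.foldl (fun d t => d.insert (pvDictGet t "name") t) m) pvPreferredNames)) := by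
  induction ts generalizing m with
  | nil => rfl
  | cons t rest ih =>
    simp only [List.foldl_cons]
    rw [pvStep, ih]

-- ===== VERDICT (by name: the statement is the Claim_ definition above) =====
theorem find_close_transition_py_spec : Claim_equal_find_close_transition_py := by
  intro ts _
  unfold Spec_find_close_transition_py find_close_transition_py find_close_transition_py_alt
  have h0 : ((none : Option (List (String × String))), (pvPreferredNames.length : Int))
      = (pvLoopA PySem.Dict.empty pvPreferredNames,
         pvRankOf (pvMidx PySem.Dict.empty pvPreferredNames)) := by decide
  simp only [h0]
  rw [pvMain]
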